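-- pv_equiv track=rewrite | github.com/elahea2020/6.00 | 6.0001PSET/PSET3/PS3/ps3.py | is_valid_word
-- ===== SOURCE A (Python) =====
-- CONSONANTS = 'bcdfghjklmnpqrstvwxyz'
--
-- def is_valid_word(word, hand, word_list):
--     """
--     Returns True if word is in the word_list and is entirely
--     composed of letters in the hand (that is, there are enough of
--     each letter in the hand to construct the word). Otherwise,
--     returns False.
--     Does not mutate hand or word_list.
--
--     For Problem #4, returns True if replacing the wildcard @ with
--     a consonant forms a word in word_list.
--
--     word: string
--     hand: dictionary (string -> int)
--     word_list: list of lowercase strings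
--     returns: boolean
--     """
--     word = word.lower()
--     copy_hand = hand.copy()
--     wild_card = '@'
--     flag = False
--     #  This part is added for the wild card it will check if the person used the wild card and then it will replace all
--     #  of the consonants. If the after replacment the word is in the word list then it will break and checks for other
--     #  constraints in the game
--     if wild_card in word:
--         for letter in CONSONANTS:
--             new_word = word.replace(wild_card,letter)
--             if new_word in word_list:
--                 flag = True
--                 break
--
--     if word in word_list or flag:
--         for i in word:
--             if i in copy_hand and copy_hand[i] > 0:
--                 copy_hand[i] -= 1
--             else:
--                 # Here if the letter is not in the hand or it has been used more than it should the function will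
--                 # return False
--                 return False
--     else:
--         # Here if the word is not in the word list i.e it is not a valid word the function will return False
--         return False
--
--     # If it passes all of the checks then the function should return True
--     return True
-- ===== SOURCE B (Python) =====
-- def is_valid_word(word, hand, word_list):
--     word = word.lower()
--     valid = word in word_list or ('@' in word and any(
--         word.replace('@', c) in word_list for c in 'bcdfghjklmnpqrstvwxyz'))
--     counts = {}
--     for ch in word:
--         counts[ch] = counts.get(ch, 0) + 1
--     return valid and all(hand.get(ch, 0) >= n for ch, n in counts.items())
-- ===== Notes on version B (the rewrite author's own statement) =====
-- stated objective: simpler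
-- what changed: The per-letter copy-hand-and-decrement loop with early return is replaced by building a frequency table of the lowercased word once and comparing each letter's count against hand.get(ch,0); hand is never copied or mutated, and the word-list/wildcard check becomes a single boolean expression with any().
import Mathlib
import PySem

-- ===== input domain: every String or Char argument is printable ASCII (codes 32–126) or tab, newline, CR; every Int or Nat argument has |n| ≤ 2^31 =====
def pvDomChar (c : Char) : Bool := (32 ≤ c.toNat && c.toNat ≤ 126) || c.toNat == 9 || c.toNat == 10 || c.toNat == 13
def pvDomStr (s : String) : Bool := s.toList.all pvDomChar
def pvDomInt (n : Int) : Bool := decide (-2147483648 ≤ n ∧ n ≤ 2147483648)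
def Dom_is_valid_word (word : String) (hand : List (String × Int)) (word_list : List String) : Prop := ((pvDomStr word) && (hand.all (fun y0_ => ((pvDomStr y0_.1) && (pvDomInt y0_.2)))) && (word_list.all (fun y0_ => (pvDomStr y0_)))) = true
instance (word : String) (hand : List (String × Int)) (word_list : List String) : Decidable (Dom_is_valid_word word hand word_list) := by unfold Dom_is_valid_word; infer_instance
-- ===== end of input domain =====

-- B replaces A's copy-hand-and-decrement loop by a frequency table of the word compared
-- against the (unmutated) hand, for simplicity; return values are proved equal everywhere.

-- ===== PORT A =====
def pvConsonants : List Char := "bcdfghjklmnpqrstvwxyz".toList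

-- A's wildcard for-loop with break: flag becomes True on the first consonant substitution in word_list
def pvWildLoopA (w : String) (word_list : List String) : List Char → Bool
  | [] => false
  | l :: ls =>
      if word_list.contains (PySem.Str.replace w "@" (String.singleton l)) then true
      else pvWildLoopA w word_list ls

-- A's 'for i in word' loop: decrement copy_hand[i] when present and positive, else return False
def pvHandLoopA (d : PySem.Dict String Int) : List Char → Bool
  | [] => true
  | c :: cs =>
      match d.get? (String.singleton c) with
      | some v => if 0 < v then pvHandLoopA (d.insert (String.singleton c) (v - 1)) cs else false
      | none => false

def is_valid_word (word : String) (hand : List (String × Int)) (word_list : List String) : Bool :=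
  let w := PySem.Str.lower word
  let copy_hand := PySem.Dict.ofList hand
  let flag := if PySem.Str.isIn "@" w then pvWildLoopA w word_list pvConsonants else false
  if word_list.contains w || flag then pvHandLoopA copy_hand w.toList else false

-- ===== PORT B =====
def is_valid_word_alt (word : String) (hand : List (String × Int)) (word_list : List String) : Bool :=
  let w := PySem.Str.lower word
  let valid := word_list.contains w ||
    (PySem.Str.isIn "@" w &&
      pvConsonants.any (fun c => word_list.contains (PySem.Str.replace w "@" (String.singleton c))))
  let counts := w.toList.foldl (fun d ch => d.insert ch (d.getD ch 0 + 1)) PySem.Dict.empty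
  valid && counts.items.all (fun p => (PySem.Dict.ofList hand).getD (String.singleton p.1) 0 ≥ p.2)

-- ===== PRECONDITION & SPEC =====
def Spec_is_valid_word (word : String) (hand : List (String × Int)) (word_list : List String) (out : Bool) : Prop := out = is_valid_word_alt word hand word_list
instance (word : String) (hand : List (String × Int)) (word_list : List String) (out : Bool) : Decidable (Spec_is_valid_word word hand word_list out) := by unfold Spec_is_valid_word; infer_instance

-- ===== CLAIM (what is proved, stated in full; the proofs are below) =====
def Claim_equal_is_valid_word : Prop := ∀ (word : String) (hand : List (String × Int)) (word_list : List String), Dom_is_valid_word word hand word_list → Spec_is_valid_word word hand word_list (is_valid_word word hand word_list)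

-- ===== LEMMAS AND PROOFS =====

theorem pvSingleton_inj {a b : Char} (h : String.singleton a = String.singleton b) : a = b := by
  have := congrArg String.toList h
  simpa using this

-- A's wildcard loop IS any over the consonants
theorem pvWildLoopA_eq_any (w : String) (wl : List String) (ls : List Char) :
    pvWildLoopA w wl ls = ls.any (fun c => wl.contains (PySem.Str.replace w "@" (String.singleton c))) := by
  induction ls with
  | nil => rfl
  | cons l ls ih =>
      simp only [pvWildLoopA, List.any_cons, ih]
      cases h : wl.contains (PySem.Str.replace w "@" (String.singleton l)) <;> simp

-- A's decrement loop succeeds iff every letter's multiplicity fits the dictionary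
theorem pvHandLoopA_iff (cs : List Char) (d : PySem.Dict String Int) :
    pvHandLoopA d cs = true ↔ ∀ c ∈ cs, (cs.count c : Int) ≤ d.getD (String.singleton c) 0 := by
  induction cs generalizing d with
  | nil => simp [pvHandLoopA]
  | cons c cs ih =>
      cases hv : d.get? (String.singleton c) with
      | none =>
          have hd : d.getD (String.singleton c) 0 = 0 := by
            simp [PySem.Dict.getD, hv]
          simp only [pvHandLoopA, hv]
          constructor
          · intro h; cases h
          · intro h
            have := h c (by simp)
            simp [hd, List.count_cons_self] at this
            omega
      | some v =>
          have hd : d.getD (String.singleton c) 0 = v := by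
            simp [PySem.Dict.getD, hv]
          simp only [pvHandLoopA, hv]
          by_cases hpos : 0 < v
          · simp only [if_pos hpos]
            rw [ih]
            constructor
            · intro h x hx
              by_cases hxc : x = c
              · subst hxc
                by_cases hmem : x ∈ cs
                · have := h x hmem
                  rw [PySem.Dict.getD_insert_self] at this
                  simp [List.count_cons_self, hd]
                  omega
                · simp [List.count_cons_self, List.count_eq_zero_of_not_mem hmem, hd]
                  omega
              · rcases List.mem_cons.mp hx with h1 | h1
                · exact absurd h1 hxc
                · have := h x h1
                  rw [PySem.Dict.getD_insert_of_ne] at this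
                  · have hc2 : (c :: cs).count x = cs.count x := by
                      simp [Ne.symm hxc]
                    rw [hc2]
                    exact this
                  · intro hk; exact hxc (pvSingleton_inj hk)
            · intro h x hx
              by_cases hxc : x = c
              · subst hxc
                have := h x (List.mem_cons_self ..)
                rw [PySem.Dict.getD_insert_self]
                simp [List.count_cons_self, hd] at this
                omega
              · have := h x (List.mem_cons_of_mem _ hx)
                rw [PySem.Dict.getD_insert_of_ne]
                · have hc2 : (c :: cs).count x = cs.count x := by
                    simp [Ne.symm hxc]
                  rw [hc2] at this
                  exact this
                · intro hk; exact hxc (pvSingleton_inj hk)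
          · simp only [if_neg hpos]
            constructor
            · intro h; cases h
            · intro h
              have := h c (by simp)
              simp [hd, List.count_cons_self] at this
              omega

-- B's all-items check says the same thing
theorem pvAllItems_iff (cs : List Char) (hd : PySem.Dict String Int) :
    ((cs.foldl (fun d ch => d.insert ch (d.getD ch 0 + 1)) PySem.Dict.empty).items.all
        (fun p => hd.getD (String.singleton p.1) 0 ≥ p.2)) = true
      ↔ ∀ c ∈ cs, (cs.count c : Int) ≤ hd.getD (String.singleton c) 0 := by
  rw [PySem.Dict.foldl_insert_getD_add_one_eq_counter, PySem.Dict.items_counter]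
  simp only [List.all_map, List.all_eq_true, Function.comp]
  constructor
  · intro h c hc
    simpa using h c ((PySem.Set.mem_ofList _ _).mpr hc)
  · intro h k hk
    simpa using h k ((PySem.Set.mem_ofList _ _).mp hk)

-- ===== VERDICT (by name: the statement is the Claim_ definition above) =====
theorem is_valid_word_spec : Claim_equal_is_valid_word := by
  intro word hand word_list _
  simp only [Spec_is_valid_word, is_valid_word, is_valid_word_alt]
  rw [pvWildLoopA_eq_any]
  have hif : (if PySem.Str.isIn "@" (PySem.Str.lower word) = true
      then pvConsonants.any (fun c => word_list.contains (PySem.Str.replace (PySem.Str.lower word) "@" (String.singleton c)))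
      else false)
      = (PySem.Str.isIn "@" (PySem.Str.lower word) && pvConsonants.any (fun c => word_list.contains (PySem.Str.replace (PySem.Str.lower word) "@" (String.singleton c)))) := by
    cases PySem.Str.isIn "@" (PySem.Str.lower word) <;> simp
  rw [hif]
  cases hvalid : (word_list.contains (PySem.Str.lower word) ||
      (PySem.Str.isIn "@" (PySem.Str.lower word) &&
        pvConsonants.any (fun c => word_list.contains (PySem.Str.replace (PySem.Str.lower word) "@" (String.singleton c))))) with
  | false => simp
  | true =>
      simp only [if_true, Bool.true_and]
      rw [Bool.eq_iff_iff, pvHandLoopA_iff, pvAllItems_iff]
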